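-- pv_equiv track=rewrite | github.com/bigstar9906/Coding-test | 프로그래머스/2/340212. ［PCCP 기출문제］ 2번 ／ 퍼즐 게임 챌린지/［PCCP 기출문제］ 2번 ／ 퍼즐 게임 챌린지.py | solution
-- ===== SOURCE A (Python) =====
-- def solution(diffs, times, limit):
--     decrease = 0
--     beforeT = 0
--     time = 0
--     levToTime = dict()
--     for i in range(len(diffs)):
--         currentD = diffs[i]
--         currentT = times[i]
--         if currentD>1:
--             current=currentT+beforeT
--             decrease+=current
--             if currentD in levToTime:
--                 levToTime[currentD]+=current
--             else:
--                 levToTime[currentD]=current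
--         time+=currentT*currentD+beforeT*(currentD-1)
--         beforeT = currentT
--     level=1
--     while time>limit:
--         level+=1
--         time-=decrease
--         if level in levToTime:
--             decrease-=levToTime[level]
--     return level
-- ===== SOURCE B (Python) =====
-- def solution(diffs, times, limit):
--     # weights w[i] = times[i] + times[i-1] (0 before the first puzzle)
--     w = []
--     prev = 0
--     for t in times[:len(diffs)]:
--         w.append(t + prev)
--         prev = t
--     # time at level 1, total per-level decrease, and decrease grouped by difficulty
--     time = 0
--     dec = 0
--     group = {}
--     for d, t, wi in zip(diffs, times, w):
--         time += t + (d - 1) * wi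
--         if d > 1:
--             dec += wi
--             group[d] = group.get(d, 0) + wi
--     # jump across the linear segments between distinct difficulties by division
--     level = 1
--     for b in sorted(group):
--         if time <= limit:
--             return level
--         if dec > 0:
--             need = -((limit - time) // dec)   # ceil((time - limit) / dec)
--             if level + need <= b:
--                 return level + need
--         time -= (b - level) * dec
--         level = b
--         dec -= group[b]
--     return level
-- ===== Notes on version B (the rewrite author's own statement) =====
-- stated objective: faster
-- what changed: A decrements the remaining time one level at a time until it fits the limit; B groups the per-level decrease by difficulty once, sorts the distinct difficulties, and jumps across each linear segment with a single ceiling division.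
-- outside the precondition, e.g. on solution([3, 3], [5, 5], 0): A does not finish within the time limit, B returns 3; on solution([2], [], 0): A raises IndexError, B returns 1
import Mathlib
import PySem

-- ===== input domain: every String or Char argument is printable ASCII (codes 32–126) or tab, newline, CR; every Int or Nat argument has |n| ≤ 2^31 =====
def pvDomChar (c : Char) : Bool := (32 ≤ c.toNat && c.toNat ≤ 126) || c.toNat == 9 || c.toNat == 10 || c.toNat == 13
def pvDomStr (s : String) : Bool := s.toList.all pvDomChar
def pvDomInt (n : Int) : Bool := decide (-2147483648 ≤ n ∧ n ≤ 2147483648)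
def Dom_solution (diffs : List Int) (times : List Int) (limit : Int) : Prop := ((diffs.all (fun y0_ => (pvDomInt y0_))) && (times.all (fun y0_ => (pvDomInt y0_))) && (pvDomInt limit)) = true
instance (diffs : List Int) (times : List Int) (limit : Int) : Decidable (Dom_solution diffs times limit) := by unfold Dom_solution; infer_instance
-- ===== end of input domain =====

-- B replaces A's level-by-level while loop (O(max diff) iterations) by jumping across the
-- linear segments between distinct difficulties with one ceiling division per segment.

-- ===== PORT A =====
-- first for-loop of A; iterates diffs[i], times[i] in step, so ported as simultaneous
-- structural recursion on the two lists (exact for len(diffs) ≤ len(times); Python raises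
-- IndexError otherwise, excluded by Pre_).  State: (decrease, beforeT, time, levToTime).
def phaseA : List Int → List Int → Int → Int → Int → PySem.Dict Int Int →
    Int × Int × Int × PySem.Dict Int Int
  | [], _, dec, b, time, m => (dec, b, time, m)
  | _ :: _, [], dec, b, time, m => (dec, b, time, m)  -- IndexError in Python; outside Pre_
  | d :: ds, t :: ts, dec, b, time, m =>
      let cur := t + b
      let dec' := if 1 < d then dec + cur else dec
      let m' := if 1 < d then
          (if m.contains d then m.insert d (m.getD d 0 + cur) else m.insert d cur)
        else m
      phaseA ds ts dec' t (time + t * d + b * (d - 1)) m'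

-- A's while loop.  The fuel only makes the recursion structural: on every input admitted by
-- Pre_ the loop stops at some level ≤ max(max(diffs), 1), so the fuel is never exhausted.
def loopA (limit : Int) : Nat → Int → Int → Int → PySem.Dict Int Int → Int
  | 0, level, _, _, _ => level
  | f + 1, level, time, dec, m =>
      if time ≤ limit then level
      else
        let level' := level + 1
        let dec' := if m.contains level' then dec - m.getD level' 0 else dec
        loopA limit f level' (time - dec) dec' m

def solution (diffs : List Int) (times : List Int) (limit : Int) : Int :=
  let r := phaseA diffs times 0 0 0 PySem.Dict.empty
  loopA limit (diffs.foldr (fun d m => max d m) 1).toNat 1 r.2.2.1 r.1 r.2.2.2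

-- ===== PORT B =====
-- w[i] = times[i] + times[i-1], built from times[:len(diffs)] (slice = take: bound ≥ 0)
def wlist : List Int → Int → List Int
  | [], _ => []
  | t :: ts, prev => (t + prev) :: wlist ts t

-- B's single accumulation pass over zip(diffs, times, w): (time, dec, group)
def phaseB : List Int → List Int → List Int → Int → Int → PySem.Dict Int Int →
    Int × Int × PySem.Dict Int Int
  | d :: ds, t :: ts, wi :: ws, time, dec, g =>
      let time' := time + t + (d - 1) * wi
      if 1 < d then phaseB ds ts ws time' (dec + wi) (g.insert d (g.getD d 0 + wi))
      else phaseB ds ts ws time' dec g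
  | _, _, _, time, dec, g => (time, dec, g)

-- B's segment loop over the sorted distinct difficulties
def loopB (limit : Int) : List Int → Int → Int → Int → PySem.Dict Int Int → Int
  | [], level, _, _, _ => level
  | b :: bs, level, time, dec, g =>
      if time ≤ limit then level
      else if 0 < dec then
        let need := -(PySem.Int.floordiv (limit - time) dec)
        if level + need ≤ b then level + need
        else loopB limit bs b (time - (b - level) * dec) (dec - g.getD b 0) g
      else loopB limit bs b (time - (b - level) * dec) (dec - g.getD b 0) g

def solution_alt (diffs : List Int) (times : List Int) (limit : Int) : Int :=
  let w := wlist (times.take diffs.length) 0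
  let r := phaseB diffs times w 0 0 PySem.Dict.empty
  loopB limit (PySem.List.sorted r.2.2.keys (fun x => x) false) 1 r.1 r.2.1 r.2.2

-- ===== PRECONDITION & SPEC =====
-- closed form: total play time at level L; puzzle i with difficulty d, time t and previous
-- time tp costs t + max(d-L,0)*(t+tp) if d > 1, and t + (d-1)*(t+tp) otherwise
def lvlTime (diffs times : List Int) (L : Int) : Int :=
  ((diffs.zip (times.zip (0 :: times))).map
    (fun p => p.2.1 + (if 1 < p.1 then max (p.1 - L) 0 else p.1 - 1) * (p.2.1 + p.2.2))).sum

-- Pre_ excludes exactly the inputs on which Python A does not return: it raises IndexError when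
-- diffs is longer than times, and loops forever when the per-level total time never reaches
-- limit (the piecewise-linear time can only cross the limit at level 1, at a difficulty value,
-- or at its final constant value, reached at level max(max(diffs), 1)).
def Pre_solution (diffs : List Int) (times : List Int) (limit : Int) : Prop :=
  diffs.length ≤ times.length ∧
    (lvlTime diffs times 1 ≤ limit ∨
      lvlTime diffs times (diffs.foldr (fun d m => max d m) 1) ≤ limit ∨
      ∃ d ∈ diffs, 1 < d ∧ lvlTime diffs times d ≤ limit)
instance (diffs : List Int) (times : List Int) (limit : Int) : Decidable (Pre_solution diffs times limit) := by
  unfold Pre_solution; infer_instance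

def pvWitness_solution : List Int × List Int × Int := ([1, 4, 3, 2], [10, 5, 8, 7], 120)

def Spec_solution (diffs : List Int) (times : List Int) (limit : Int) (out : Int) : Prop := out = solution_alt diffs times limit
instance (diffs : List Int) (times : List Int) (limit : Int) (out : Int) : Decidable (Spec_solution diffs times limit out) := by unfold Spec_solution; infer_instance

-- ===== CLAIM (what is proved, stated in full; the proofs are below) =====
def Claim_equal_solution : Prop := ∀ (diffs : List Int) (times : List Int) (limit : Int), Dom_solution diffs times limit → Pre_solution diffs times limit → Spec_solution diffs times limit (solution diffs times limit)

-- ===== LEMMAS AND PROOFS =====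

-- proof-layer description of A's state: triples (diff, time, weight = time + previous time)
def mkP : List Int → List Int → Int → List (Int × Int × Int)
  | d :: ds, t :: ts, prev => (d, t, t + prev) :: mkP ds ts t
  | _, _, _ => []

def sTF (P : List (Int × Int × Int)) (L : Int) : Int :=
  P.foldr (fun p a => p.2.1 + (if 1 < p.1 then max (p.1 - L) 0 else p.1 - 1) * p.2.2 + a) 0

theorem zipsum_eq_sTF (L : Int) : ∀ (ds ts : List Int) (prev : Int),
    ((ds.zip (ts.zip (prev :: ts))).map
      (fun p => p.2.1 + (if 1 < p.1 then max (p.1 - L) 0 else p.1 - 1) * (p.2.1 + p.2.2))).sum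
      = sTF (mkP ds ts prev) L := by
  intro ds
  induction ds with
  | nil => intro ts prev; simp [mkP, sTF]
  | cons d ds ih =>
      intro ts prev
      cases ts with
      | nil => simp [mkP, sTF]
      | cons t ts' =>
          simp only [List.zip_cons_cons, List.map_cons, List.sum_cons, mkP]
          rw [ih ts' t]
          simp only [sTF, List.foldr]

theorem lvlTime_eq (diffs times : List Int) (L : Int) :
    lvlTime diffs times L = sTF (mkP diffs times 0) L := zipsum_eq_sTF L diffs times 0

-- reference scan: first level ≥ l whose time is ≤ limit (fuel-bounded)
def firstLv (P : List (Int × Int × Int)) (limit : Int) : Nat → Int → Int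
  | 0, l => l
  | f + 1, l => if sTF P l ≤ limit then l else firstLv P limit f (l + 1)

-- per-level decrease at level L
def sD (P : List (Int × Int × Int)) (L : Int) : Int :=
  P.foldr (fun p a => (if L < p.1 then p.2.2 else 0) + a) 0

-- decrease removed when level v is reached
def sG (P : List (Int × Int × Int)) (v : Int) : Int :=
  P.foldr (fun p a => (if 1 < p.1 ∧ p.1 = v then p.2.2 else 0) + a) 0


-- step identities for the per-level sums
theorem sTF_succ (P : List (Int × Int × Int)) (L : Int) (h : 1 ≤ L) :
    sTF P (L + 1) = sTF P L - sD P L := by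
  induction P with
  | nil => simp [sTF, sD]
  | cons p P ih =>
      obtain ⟨d, t, w⟩ := p
      simp only [sTF, sD, List.foldr] at ih ⊢
      by_cases hd : 1 < d
      · by_cases hL : L < d
        · rw [if_pos hd, if_pos hd, if_pos hL,
            max_eq_left (by omega : (0:Int) ≤ d - (L + 1)),
            max_eq_left (by omega : (0:Int) ≤ d - L), ih]
          ring
        · rw [if_pos hd, if_pos hd, if_neg hL,
            max_eq_right (by omega : d - (L + 1) ≤ (0:Int)),
            max_eq_right (by omega : d - L ≤ (0:Int)), ih]
          ring
      · rw [if_neg hd, if_neg hd, if_neg (by omega : ¬ L < d), ih]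
        ring

theorem sD_succ (P : List (Int × Int × Int)) (L : Int) (h : 1 ≤ L) :
    sD P (L + 1) = sD P L - sG P (L + 1) := by
  induction P with
  | nil => simp [sD, sG]
  | cons p P ih =>
      obtain ⟨d, t, w⟩ := p
      simp only [sD, sG, List.foldr] at ih ⊢
      rw [ih]
      by_cases h1 : L + 1 < d
      · rw [if_pos h1, if_pos (by omega : L < d), if_neg (by omega : ¬ (1 < d ∧ d = L + 1))]
        ring
      · by_cases h2 : d = L + 1
        · rw [if_neg h1, if_pos (by omega : L < d), if_pos (⟨by omega, h2⟩ : 1 < d ∧ d = L + 1)]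
          ring
        · rw [if_neg h1, if_neg (by omega : ¬ L < d), if_neg (by omega : ¬ (1 < d ∧ d = L + 1))]
          ring

theorem sG_zero (P : List (Int × Int × Int)) (v : Int)
    (h : ∀ p ∈ P, p.1 ≠ v) : sG P v = 0 := by
  induction P with
  | nil => simp [sG]
  | cons p P ih =>
      have hp := h p (by simp)
      show (if 1 < p.1 ∧ p.1 = v then p.2.2 else 0) + sG P v = 0
      rw [if_neg (by tauto), ih (fun q hq => h q (by simp [hq]))]
      ring

theorem sD_zero (P : List (Int × Int × Int)) (L : Int)
    (h : ∀ p ∈ P, ¬ L < p.1) : sD P L = 0 := by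
  induction P with
  | nil => simp [sD]
  | cons p P ih =>
      have hp := h p (by simp)
      show (if L < p.1 then p.2.2 else 0) + sD P L = 0
      rw [if_neg hp, ih (fun q hq => h q (by simp [hq]))]
      ring

-- linearity of sTF across a breakpoint-free stretch of levels
theorem sTF_lin (P : List (Int × Int × Int)) (L : Int) (hL : 1 ≤ L) :
    ∀ j : Nat, (∀ v : Int, L < v → v < L + j → sG P v = 0) →
      sTF P (L + j) = sTF P L - j * sD P L ∧
        (j = 0 ∨ sD P (L + j) = sD P L - sG P (L + j)) := by
  intro j
  induction j with
  | zero => intro _; simp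
  | succ j ih =>
      intro hv
      obtain ⟨h1, h2⟩ := ih (fun v a b => hv v a (by push_cast at b ⊢; omega))
      have hDj : sD P (L + j) = sD P L := by
        rcases h2 with h0 | h2
        · rw [h0]; norm_num
        · rcases Nat.eq_zero_or_pos j with h0 | hj0
          · rw [h0]; norm_num
          · rw [h2, hv (L + j) (by omega) (by push_cast; omega)]; ring
      constructor
      · have hs := sTF_succ P (L + j) (by omega)
        push_cast
        have e : L + ((j : Int) + 1) = (L + j) + 1 := by ring
        rw [e, hs, h1, hDj]; ring
      · right
        have hs := sD_succ P (L + j) (by omega)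
        push_cast
        have e : L + ((j : Int) + 1) = (L + j) + 1 := by ring
        rw [e, hs, hDj]

-- the ceiling division B performs: smallest positive step count crossing the limit
theorem ceil_spec (time limit dec : Int) (hdec : 0 < dec) (ht : limit < time) :
    1 ≤ -(PySem.Int.floordiv (limit - time) dec) ∧
      time - (-(PySem.Int.floordiv (limit - time) dec)) * dec ≤ limit ∧
      ∀ j : Int, 0 ≤ j → j < -(PySem.Int.floordiv (limit - time) dec) →
        limit < time - j * dec := by
  have hlo : PySem.Int.floordiv (limit - time) dec * dec ≤ limit - time :=
    (PySem.Int.le_floordiv_iff_mul_le hdec).mp le_rfl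
  have hneg : PySem.Int.floordiv (limit - time) dec < 0 :=
    (PySem.Int.floordiv_lt_iff_lt_mul hdec).mpr (by nlinarith)
  refine ⟨by omega, by nlinarith, ?_⟩
  intro j hj0 hjlt
  have hq : PySem.Int.floordiv (limit - time) dec < -j := by omega
  have := (PySem.Int.floordiv_lt_iff_lt_mul hdec).mp hq
  nlinarith

theorem firstLv_hit (P : List (Int × Int × Int)) (limit : Int) (f : Nat) (l : Int)
    (h : sTF P l ≤ limit) : firstLv P limit f l = l := by
  cases f <;> simp [firstLv, h]

theorem firstLv_skip (P : List (Int × Int × Int)) (limit : Int) :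
    ∀ (n f : Nat) (l : Int), n ≤ f →
      (∀ m : Nat, m < n → ¬ sTF P (l + m) ≤ limit) →
      firstLv P limit f l = firstLv P limit (f - n) (l + n) := by
  intro n
  induction n with
  | zero => intro f l _ _; simp
  | succ n ih =>
      intro f l hnf hm
      obtain ⟨f', rfl⟩ : ∃ f', f = f' + 1 := ⟨f - 1, by omega⟩
      have h0 : ¬ sTF P l ≤ limit := by have := hm 0 (by omega); simpa using this
      simp only [firstLv, h0, if_false]
      rw [ih f' (l + 1) (by omega) (fun m hm' => by
        have hx := hm (m + 1) (by omega)
        push_cast at hx ⊢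
        have e : l + 1 + (m : Int) = l + ((m : Int) + 1) := by ring
        rw [e]; exact hx)]
      congr 1
      · omega
      · push_cast; ring

-- ===== phase lemmas =====
theorem phaseA_spec : ∀ (ds ts : List Int) (prev dec time : Int) (m : PySem.Dict Int Int),
    ds.length ≤ ts.length →
    (phaseA ds ts dec prev time m).1 = dec + sD (mkP ds ts prev) 1 ∧
    (phaseA ds ts dec prev time m).2.2.1 = time + sTF (mkP ds ts prev) 1 ∧
    (∀ v, (phaseA ds ts dec prev time m).2.2.2.getD v 0 = m.getD v 0 + sG (mkP ds ts prev) v) := by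
  intro ds
  induction ds with
  | nil => intro ts prev dec time m _; simp [phaseA, mkP, sTF, sD, sG]
  | cons d ds ih =>
      intro ts prev dec time m hlen
      match ts with
      | [] => simp at hlen
      | t :: ts =>
        have hlen' : ds.length ≤ ts.length := by simpa using hlen
        simp only [phaseA]
        have hmeq : (if 1 < d then (if m.contains d then m.insert d (m.getD d 0 + (t + prev)) else m.insert d (t + prev)) else m)
            = (if 1 < d then m.insert d (m.getD d 0 + (t + prev)) else m) := by
          by_cases hc : m.contains d = true
          · rw [if_pos hc]
          · have h0 : m.getD d 0 = 0 := PySem.Dict.getD_of_not_contains m 0 (by simpa using hc)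
            rw [if_neg hc, h0, zero_add]
        rw [hmeq]
        by_cases hd : 1 < d
        · rw [if_pos hd, if_pos hd]
          obtain ⟨ih1, ih2, ih3⟩ := ih ts t (dec + (t + prev)) (time + t * d + prev * (d - 1))
            (m.insert d (m.getD d 0 + (t + prev))) hlen'
          refine ⟨?_, ?_, ?_⟩
          · rw [ih1]; simp only [mkP, sD, List.foldr]; rw [if_pos hd]; ring
          · rw [ih2]; simp only [mkP, sTF, List.foldr]
            rw [if_pos hd, max_eq_left (by omega : (0:Int) ≤ d - 1)]; ring
          · intro v
            rw [ih3 v, PySem.Dict.getD_insert]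
            simp only [mkP, sG, List.foldr]
            by_cases hv : v = d
            · subst hv; rw [if_pos rfl, if_pos ⟨hd, rfl⟩]; ring
            · rw [if_neg hv, if_neg (by tauto : ¬ (1 < d ∧ d = v))]; ring
        · rw [if_neg hd, if_neg hd]
          obtain ⟨ih1, ih2, ih3⟩ := ih ts t dec (time + t * d + prev * (d - 1)) m hlen'
          refine ⟨?_, ?_, ?_⟩
          · rw [ih1]; simp only [mkP, sD, List.foldr]; rw [if_neg hd]; ring
          · rw [ih2]; simp only [mkP, sTF, List.foldr]; rw [if_neg hd]; ring
          · intro v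
            rw [ih3 v]
            simp only [mkP, sG, List.foldr]
            rw [if_neg (by tauto : ¬ (1 < d ∧ d = v))]; ring

theorem phaseB_spec : ∀ (ds ts : List Int) (prev time dec : Int) (g : PySem.Dict Int Int),
    ds.length ≤ ts.length →
    (phaseB ds ts (wlist (ts.take ds.length) prev) time dec g).1 = time + sTF (mkP ds ts prev) 1 ∧
    (phaseB ds ts (wlist (ts.take ds.length) prev) time dec g).2.1 = dec + sD (mkP ds ts prev) 1 ∧
    (∀ v, (phaseB ds ts (wlist (ts.take ds.length) prev) time dec g).2.2.getD v 0 = g.getD v 0 + sG (mkP ds ts prev) v) ∧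
    (∀ v, v ∈ (phaseB ds ts (wlist (ts.take ds.length) prev) time dec g).2.2.keys ↔
      v ∈ g.keys ∨ ∃ p ∈ mkP ds ts prev, 1 < p.1 ∧ p.1 = v) ∧
    (g.keys.Nodup → (phaseB ds ts (wlist (ts.take ds.length) prev) time dec g).2.2.keys.Nodup) := by
  intro ds
  induction ds with
  | nil =>
      intro ts prev time dec g _
      simp [phaseB, mkP, sTF, sD, sG]
  | cons d ds ih =>
      intro ts prev time dec g hlen
      match ts with
      | [] => simp at hlen
      | t :: ts =>
        have hlen' : ds.length ≤ ts.length := by simpa using hlen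
        simp only [List.length_cons, List.take_succ_cons, wlist]
        by_cases hd : 1 < d
        · simp only [phaseB, if_pos hd]
          obtain ⟨ihT, ihD, ihG, ihK, ihN⟩ := ih ts t (time + t + (d - 1) * (t + prev))
            (dec + (t + prev)) (g.insert d (g.getD d 0 + (t + prev))) hlen'
          refine ⟨?_, ?_, ?_, ?_, ?_⟩
          · rw [ihT]; simp only [mkP, sTF, List.foldr]
            rw [if_pos hd, max_eq_left (by omega : (0:Int) ≤ d - 1)]; ring
          · rw [ihD]; simp only [mkP, sD, List.foldr]; rw [if_pos hd]; ring
          · intro v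
            rw [ihG v, PySem.Dict.getD_insert]
            simp only [mkP, sG, List.foldr]
            by_cases hv : v = d
            · subst hv; rw [if_pos rfl, if_pos ⟨hd, rfl⟩]; ring
            · rw [if_neg hv, if_neg (by tauto : ¬ (1 < d ∧ d = v))]; ring
          · intro v
            rw [ihK v, PySem.Dict.mem_keys_insert]
            simp only [mkP, List.mem_cons]
            constructor
            · rintro ((rfl | h) | ⟨p, hp, hp1, hp2⟩)
              · exact Or.inr ⟨(v, t, t + prev), Or.inl (by simp), hd, rfl⟩
              · exact Or.inl h
              · exact Or.inr ⟨p, Or.inr hp, hp1, hp2⟩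
            · rintro (h | ⟨p, hp, hp1, hp2⟩)
              · exact Or.inl (Or.inr h)
              · rcases hp with rfl | hp
                · exact Or.inl (Or.inl hp2.symm)
                · exact Or.inr ⟨p, hp, hp1, hp2⟩
          · intro hnd
            exact ihN (PySem.Dict.nodup_keys_insert _ _ _ hnd)
        · simp only [phaseB, if_neg hd]
          obtain ⟨ihT, ihD, ihG, ihK, ihN⟩ := ih ts t (time + t + (d - 1) * (t + prev)) dec g hlen'
          refine ⟨?_, ?_, ?_, ?_, ?_⟩
          · rw [ihT]; simp only [mkP, sTF, List.foldr]; rw [if_neg hd]; ring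
          · rw [ihD]; simp only [mkP, sD, List.foldr]; rw [if_neg hd]; ring
          · intro v
            rw [ihG v]
            simp only [mkP, sG, List.foldr]
            rw [if_neg (by tauto : ¬ (1 < d ∧ d = v))]; ring
          · intro v
            rw [ihK v]
            simp only [mkP, List.mem_cons]
            constructor
            · rintro (h | ⟨p, hp, hp1, hp2⟩)
              · exact Or.inl h
              · exact Or.inr ⟨p, Or.inr hp, hp1, hp2⟩
            · rintro (h | ⟨p, hp, hp1, hp2⟩)
              · exact Or.inl h
              · rcases hp with rfl | hp
                · exact absurd hp1 (by simpa using hd)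
                · exact Or.inr ⟨p, hp, hp1, hp2⟩
          · exact ihN

-- ===== loop lemmas =====
theorem loopA_eq (P : List (Int × Int × Int)) (limit : Int) :
    ∀ (f : Nat) (level time dec : Int) (m : PySem.Dict Int Int),
      1 ≤ level → time = sTF P level → dec = sD P level →
      (∀ v, m.getD v 0 = sG P v) →
      loopA limit f level time dec m = firstLv P limit f level := by
  intro f
  induction f with
  | zero => intro level time dec m _ _ _ _; simp [loopA, firstLv]
  | succ f ih =>
      intro level time dec m hl ht hd hm
      simp only [loopA, firstLv, ← ht]
      by_cases hcr : time ≤ limit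
      · rw [if_pos hcr, if_pos hcr]
      · rw [if_neg hcr, if_neg hcr]
        apply ih _ _ _ _ (by omega)
        · rw [ht, hd, sTF_succ P level hl]
        · by_cases hc : m.contains (level + 1) = true
          · rw [if_pos hc, hm, hd, sD_succ P level hl]
          · rw [if_neg hc, hd, sD_succ P level hl]
            have h0 : m.getD (level + 1) 0 = 0 :=
              PySem.Dict.getD_of_not_contains m 0 (by simpa using hc)
            rw [← hm (level + 1), h0]; ring
        · exact hm

theorem loopB_eq (P : List (Int × Int × Int)) (limit : Int) (g : PySem.Dict Int Int)
    (hg : ∀ v, g.getD v 0 = sG P v) :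
    ∀ (bs : List Int) (level time dec : Int) (f : Nat),
      1 ≤ level → time = sTF P level → dec = sD P level →
      bs.Pairwise (· < ·) →
      (∀ b ∈ bs, level < b) →
      (∀ p ∈ P, level < p.1 → p.1 ∈ bs) →
      (∃ m : Nat, m ≤ f ∧ sTF P (level + m) ≤ limit) →
      loopB limit bs level time dec g = firstLv P limit f level := by
  intro bs
  induction bs with
  | nil =>
      intro level time dec f hl ht hd _ _ h6 h7
      have hD0 : sD P level = 0 := sD_zero P level (fun p hp hlt => by simpa using h6 p hp hlt)
      have hsg : ∀ v : Int, level < v → sG P v = 0 := by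
        intro v hv
        apply sG_zero
        intro p hp hpv
        exact absurd (h6 p hp (hpv ▸ hv)) (by simp)
      obtain ⟨m, hmf, hcr⟩ := h7
      have hlin := (sTF_lin P level hl m (fun v hv _ => hsg v hv)).1
      rw [hD0, mul_zero, sub_zero] at hlin
      simp only [loopB]
      rw [firstLv_hit P limit f level (by rw [← hlin]; exact hcr)]
  | cons b bs ih =>
      intro level time dec f hl ht hd hpw hgt h6 h7
      have hbl : level < b := hgt b (by simp)
      have htail_gt : ∀ x ∈ bs, b < x := (List.pairwise_cons.mp hpw).1
      have hpw' : bs.Pairwise (· < ·) := (List.pairwise_cons.mp hpw).2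
      have hmid : ∀ v : Int, level < v → v < b → sG P v = 0 := by
        intro v h1 h2
        apply sG_zero
        intro p hp hpv
        have hmem := h6 p hp (hpv ▸ h1)
        simp only [List.mem_cons] at hmem
        rcases hmem with he | hmem
        · omega
        · have := htail_gt _ hmem; omega
      have hseg : ∀ j : Nat, (j : Int) ≤ b - level →
          sTF P (level + j) = sTF P level - j * sD P level ∧
            (j = 0 ∨ sD P (level + j) = sD P level - sG P (level + j)) :=
        fun j hj => sTF_lin P level hl j (fun v hv1 hv2 => hmid v hv1 (by omega))
      simp only [loopB]
      by_cases hcr : time ≤ limit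
      · rw [if_pos hcr, firstLv_hit P limit f level (ht ▸ hcr)]
      · rw [if_neg hcr]
        obtain ⟨m, hmf, hm⟩ := h7
        have hjmp : (∀ j : Nat, (j : Int) < b - level → limit < sTF P (level + j)) →
            loopB limit bs b (time - (b - level) * dec) (dec - g.getD b 0) g
              = firstLv P limit f level := by
          intro hnc
          have hble : 1 ≤ b - level := by omega
          set n : Nat := (b - level).toNat with hn
          have hnI : (n : Int) = b - level := by omega
          have hmn : n ≤ m := by
            by_contra hlt
            push_neg at hlt
            exact absurd hm (not_le.mpr (hnc m (by omega)))
          have hTb := (hseg n (by omega)).1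
          have hDb := (hseg n (by omega)).2.resolve_left (by omega)
          rw [hnI] at hTb hDb
          have hlb : level + (b - level) = b := by ring
          rw [hlb] at hTb hDb
          rw [firstLv_skip P limit n f level (by omega)
            (fun mm hmm => not_le.mpr (hnc mm (by omega)))]
          have hlvl : level + (n : Int) = b := by omega
          rw [hlvl]
          apply ih b _ _ (f - n) (by omega) _ _ hpw' htail_gt _ _
          · rw [ht, hd, hTb]
          · rw [hd, hg b, hDb]
          · intro p hp hbp
            have hmem := h6 p hp (by omega)
            simp only [List.mem_cons] at hmem
            rcases hmem with he | hmem
            · omega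
            · exact hmem
          · refine ⟨m - n, by omega, ?_⟩
            have e1 : ((m - n : Nat) : Int) = (m : Int) - n := by omega
            have e2 : b + ((m : Int) - n) = level + m := by omega
            rw [e1, e2]
            exact hm
        by_cases hdp : 0 < dec
        · rw [if_pos hdp]
          obtain ⟨hneed1, hneed2, hneed3⟩ := ceil_spec time limit dec hdp (by omega)
          set need := -(PySem.Int.floordiv (limit - time) dec) with hneeddef
          by_cases hin : level + need ≤ b
          · rw [if_pos hin]
            set k : Nat := need.toNat with hk
            have hkI : (k : Int) = need := by omega
            have hTk := (hseg k (by omega)).1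
            have hcross : sTF P (level + (k : Int)) ≤ limit := by
              rw [hTk, hkI, ← ht, ← hd]
              linarith [hneed2]
            have hnc2 : ∀ mm : Nat, mm < k → ¬ sTF P (level + mm) ≤ limit := by
              intro mm hmm
              have hTm := (hseg mm (by omega)).1
              have hlt := hneed3 mm (by omega) (by omega)
              rw [hTm, ← ht, ← hd]
              push_neg
              linarith [hlt]
            have hkf : k ≤ f := by
              by_contra hgt2
              push_neg at hgt2
              exact hnc2 m (by omega) hm
            rw [firstLv_skip P limit k f level hkf hnc2,
              firstLv_hit P limit _ _ hcross, hkI]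
          · rw [if_neg hin]
            apply hjmp
            intro j hj
            have hTj := (hseg j (by omega)).1
            have hlt := hneed3 j (by omega) (by omega)
            rw [hTj, ← ht, ← hd]
            linarith [hlt]
        · rw [if_neg hdp]
          apply hjmp
          intro j hj
          have hTj := (hseg j (by omega)).1
          rw [hTj, ← ht, ← hd]
          have hjd : (j : Int) * dec ≤ 0 :=
            mul_nonpos_of_nonneg_of_nonpos (by positivity) (by omega)
          linarith

-- ===== max-fold facts =====
theorem foldr_max_ge (diffs : List Int) : 1 ≤ diffs.foldr (fun d m => max d m) 1 := by
  induction diffs with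
  | nil => simp
  | cons d ds ih => simp only [List.foldr]; omega

theorem foldr_max_mem (diffs : List Int) : ∀ d ∈ diffs, d ≤ diffs.foldr (fun d m => max d m) 1 := by
  induction diffs with
  | nil => simp
  | cons d ds ih =>
      intro x hx
      simp only [List.mem_cons] at hx
      simp only [List.foldr]
      rcases hx with rfl | hx
      · omega
      · have := ih x hx
        omega

theorem solution_spec : Claim_equal_solution := by
  intro diffs times limit _ hpre
  obtain ⟨hlen, hdisj⟩ := hpre
  simp only [lvlTime_eq] at hdisj
  unfold Spec_solution
  obtain ⟨ha1, ha2, ha3⟩ := phaseA_spec diffs times 0 0 0 PySem.Dict.empty hlen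
  obtain ⟨hb1, hb2, hb3, hb4, hb5⟩ := phaseB_spec diffs times 0 0 0 PySem.Dict.empty hlen
  set P := mkP diffs times 0 with hP
  set M := diffs.foldr (fun d m => max d m) 1 with hM
  have hM1 : 1 ≤ M := foldr_max_ge diffs
  have hex : ∃ m : Nat, m ≤ M.toNat ∧ sTF P (1 + m) ≤ limit := by
    rcases hdisj with h | h | ⟨d, hdm, hd1, hdc⟩
    · exact ⟨0, by omega, by simpa using h⟩
    · refine ⟨(M - 1).toNat, by omega, ?_⟩
      have e : (1 : Int) + ((M - 1).toNat : Int) = M := by omega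
      rw [e]; exact h
    · have hdM : d ≤ M := foldr_max_mem diffs d hdm
      refine ⟨(d - 1).toNat, by omega, ?_⟩
      have e : (1 : Int) + ((d - 1).toNat : Int) = d := by omega
      rw [e]; exact hdc
  have hA : solution diffs times limit = firstLv P limit M.toNat 1 := by
    unfold solution
    apply loopA_eq P limit M.toNat 1 _ _ _ le_rfl
    · rw [ha2]; ring
    · rw [ha1]; ring
    · intro v; rw [ha3 v, PySem.Dict.getD_empty]; ring
  have hkeysnd : (phaseB diffs times (wlist (times.take diffs.length) 0) 0 0 PySem.Dict.empty).2.2.keys.Nodup :=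
    hb5 (by simp [PySem.Dict.keys_empty])
  have hkchar : ∀ v, v ∈ (phaseB diffs times (wlist (times.take diffs.length) 0) 0 0 PySem.Dict.empty).2.2.keys ↔
      ∃ p ∈ P, 1 < p.1 ∧ p.1 = v := by
    intro v
    rw [hb4 v]
    simp only [PySem.Dict.keys_empty, List.not_mem_nil, false_or]
  have hB : solution_alt diffs times limit = firstLv P limit M.toNat 1 := by
    unfold solution_alt
    set bs := PySem.List.sorted (phaseB diffs times (wlist (times.take diffs.length) 0) 0 0 PySem.Dict.empty).2.2.keys (fun x => x) false with hbs
    have hperm : bs.Perm (phaseB diffs times (wlist (times.take diffs.length) 0) 0 0 PySem.Dict.empty).2.2.keys :=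
      PySem.List.sorted_perm _ _ _
    have hnd : bs.Nodup := hperm.nodup_iff.mpr hkeysnd
    have hple : bs.Pairwise (· ≤ ·) := by
      have := PySem.List.sorted_pairwise (xs := (phaseB diffs times (wlist (times.take diffs.length) 0) 0 0 PySem.Dict.empty).2.2.keys) (key := fun x => x)
      simpa using this
    have hplt : bs.Pairwise (· < ·) := by
      refine (hple.and hnd).imp ?_
      rintro a b ⟨h1, h2⟩
      exact lt_of_le_of_ne h1 h2
    have hmembs : ∀ v, v ∈ bs ↔ ∃ p ∈ P, 1 < p.1 ∧ p.1 = v := by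
      intro v
      rw [hbs, PySem.List.mem_sorted]
      exact hkchar v
    apply loopB_eq P limit _ (fun v => by rw [hb3 v, PySem.Dict.getD_empty]; ring)
      bs 1 _ _ M.toNat le_rfl
    · rw [hb1]; ring
    · rw [hb2]; ring
    · exact hplt
    · intro b hb
      obtain ⟨p, _, hp1, hp2⟩ := (hmembs b).mp hb
      omega
    · intro p hp hlt
      exact (hmembs p.1).mpr ⟨p, hp, by omega, rfl⟩
    · exact hex
  rw [hA, hB]
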